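-- pv_equiv track=rewrite | github.com/danielhuf/INF1025 | Exercicio_7.py | vizinhos_iguais
-- ===== SOURCE A (Python) =====
-- def vizinhos_iguais(s):
--     if len(s)<=1:
--         return 0
--     else:
--         if s[0]==s[1]:
--             return 1+vizinhos_iguais(s[1:])
--         else:
--             return vizinhos_iguais(s[1:])
-- ===== SOURCE B (Python) =====
-- def vizinhos_iguais(s):
--     return sum(1 for x, y in zip(s, s[1:]) if x == y)
-- ===== Notes on version B (the rewrite author's own statement) =====
-- stated objective: faster
-- what changed: Replaced the recursion that re-slices the string at every step (each s[1:] copies the remainder, giving quadratic work and deep recursion) with a single linear pass summing over zip(s, s[1:]).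
import Mathlib
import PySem

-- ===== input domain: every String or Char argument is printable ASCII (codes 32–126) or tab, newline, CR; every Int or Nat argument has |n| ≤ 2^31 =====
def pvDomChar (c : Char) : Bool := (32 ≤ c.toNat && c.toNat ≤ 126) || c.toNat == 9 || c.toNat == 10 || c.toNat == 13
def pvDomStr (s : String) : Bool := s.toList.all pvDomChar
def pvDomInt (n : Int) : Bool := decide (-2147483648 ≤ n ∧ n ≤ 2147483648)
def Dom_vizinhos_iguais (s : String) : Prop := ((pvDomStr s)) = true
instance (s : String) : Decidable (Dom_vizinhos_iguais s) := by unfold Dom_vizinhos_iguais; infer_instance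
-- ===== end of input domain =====

-- B replaces A's recursion over repeated tail slices with one linear pass counting equal consecutive pairs (faster).


-- ===== PORT A =====
-- A's recursion: len(s)<=1 → 0; else compare s[0] with s[1] and recurse on s[1:] (the tail).
def vizinhosRecA : List Char → Int
  | [] => 0
  | [_] => 0
  | a :: b :: rest =>
      if a == b then 1 + vizinhosRecA (b :: rest) else vizinhosRecA (b :: rest)

def vizinhos_iguais (s : String) : Int := vizinhosRecA s.toList

-- ===== PORT B =====
-- B: sum(1 for x, y in zip(s, s[1:]) if x == y) — countP over the zipped pairs.
def vizinhos_iguais_alt (s : String) : Int :=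
  ((s.toList.zip s.toList.tail).countP (fun p => p.1 == p.2) : Int)

-- ===== PRECONDITION & SPEC =====
def Spec_vizinhos_iguais (s : String) (out : Int) : Prop := out = vizinhos_iguais_alt s
instance (s : String) (out : Int) : Decidable (Spec_vizinhos_iguais s out) := by unfold Spec_vizinhos_iguais; infer_instance

-- ===== CLAIM (what is proved, stated in full; the proofs are below) =====
def Claim_equal_vizinhos_iguais : Prop := ∀ (s : String), Dom_vizinhos_iguais s → Spec_vizinhos_iguais s (vizinhos_iguais s)

-- ===== LEMMAS AND PROOFS =====
theorem vizinhosRecA_eq_countP (l : List Char) :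
    vizinhosRecA l = ((l.zip l.tail).countP (fun p => p.1 == p.2) : Int) := by
  induction l with
  | nil => simp [vizinhosRecA]
  | cons a t ih =>
    cases t with
    | nil => simp [vizinhosRecA]
    | cons b rest =>
      simp only [vizinhosRecA, ih, List.tail_cons, List.zip_cons_cons, List.countP_cons]
      by_cases h : a = b <;> simp [h] <;> omega

-- ===== VERDICT (by name: the statement is the Claim_ definition above) =====
theorem vizinhos_iguais_spec : Claim_equal_vizinhos_iguais := by
  intro s _
  unfold Spec_vizinhos_iguais vizinhos_iguais vizinhos_iguais_alt
  exact vizinhosRecA_eq_countP s.toList
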